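-- pv_equiv track=rewrite | github.com/Listonoh/python | old/automata_project/automata.py | __concat_text
-- ===== SOURCE A (Python) =====
-- def __concat_text(text):
--     newtext = []
--     ctr = 0
--     strg = ""
--     for i in text:
--         if i == "[": ctr +=1
--         elif i == "]": ctr -=1
--         strg += i
--         if ctr == 0:
--             newtext.append(strg)
--             strg = ""
--     if ctr != 0:
--         raise ImportWarning("[] are not in pairs")
--     return newtext
-- ===== SOURCE B (Python) =====
-- def __concat_text(text):
--     # Two-phase: collect split boundaries where the bracket counter returns to 0,
--     # then slice the text between consecutive boundaries.
--     ctr = 0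
--     bounds = []
--     for i, ch in enumerate(text):
--         if ch == "[":
--             ctr += 1
--         elif ch == "]":
--             ctr -= 1
--         if ctr == 0:
--             bounds.append(i + 1)
--     if ctr != 0:
--         raise ImportWarning("[] are not in pairs")
--     return [text[a:b] for a, b in zip([0] + bounds, bounds)]
-- ===== Notes on version B (the rewrite author's own statement) =====
-- stated objective: alternative
-- what changed: A accumulates each group character by character into a growing string inside the scan; B first records the boundary indices where the bracket counter returns to zero, then builds the groups in a second phase by slicing the text between consecutive boundaries.
import Mathlib
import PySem

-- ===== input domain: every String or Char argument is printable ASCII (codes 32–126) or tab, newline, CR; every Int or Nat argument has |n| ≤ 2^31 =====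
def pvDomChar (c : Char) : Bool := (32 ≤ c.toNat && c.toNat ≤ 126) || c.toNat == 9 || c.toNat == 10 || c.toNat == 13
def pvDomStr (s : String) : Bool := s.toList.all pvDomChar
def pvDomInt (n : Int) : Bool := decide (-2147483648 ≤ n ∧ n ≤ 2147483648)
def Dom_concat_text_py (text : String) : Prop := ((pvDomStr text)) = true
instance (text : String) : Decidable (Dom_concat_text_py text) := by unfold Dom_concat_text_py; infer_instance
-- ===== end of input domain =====

set_option maxRecDepth 8192


-- B builds the same groups by a boundary-index pass followed by slicing between consecutive
-- boundaries (alternative decomposition, same cost); Pre_ excludes the unbalanced inputs on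
-- which both A and B raise ImportWarning.

-- ===== PORT A =====
-- Python string accumulation is kept as a List Char, turned into a String when appended.
def concat_text_py (text : String) : List String :=
  (text.toList.foldl
    (fun (s : List String × Int × List Char) i =>
      let ctr : Int := if i = '[' then s.2.1 + 1 else if i = ']' then s.2.1 - 1 else s.2.1
      let strg := s.2.2 ++ [i]
      if ctr = 0 then (s.1 ++ [String.ofList strg], ctr, []) else (s.1, ctr, strg))
    ([], 0, [])).1

-- ===== PORT B =====
def concat_text_py_alt (text : String) : List String :=
  let st := (PySem.List.enumerate text.toList 0).foldl
    (fun (s : Int × List Int) (p : Int × Char) =>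
      let ctr : Int := if p.2 = '[' then s.1 + 1 else if p.2 = ']' then s.1 - 1 else s.1
      if ctr = 0 then (ctr, s.2 ++ [p.1 + 1]) else (ctr, s.2))
    (0, [])
  (((0 : Int) :: st.2).zip st.2).map (fun ab => PySem.Str.slice text (some ab.1) (some ab.2))

-- ===== PRECONDITION & SPEC =====
-- Pre_ excludes exactly the inputs with unequal bracket counts, on which A (and B) raise ImportWarning.
def Pre_concat_text_py (text : String) : Prop :=
  text.toList.count '[' = text.toList.count ']'
instance (text : String) : Decidable (Pre_concat_text_py text) := by unfold Pre_concat_text_py; infer_instance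
def pvWitness_concat_text_py : String := "[ab][]c"
def Spec_concat_text_py (text : String) (out : List String) : Prop := out = concat_text_py_alt text
instance (text : String) (out : List String) : Decidable (Spec_concat_text_py text out) := by unfold Spec_concat_text_py; infer_instance

-- ===== CLAIM (what is proved, stated in full; the proofs are below) =====
def Claim_equal_concat_text_py : Prop := ∀ (text : String), Dom_concat_text_py text → Pre_concat_text_py text → Spec_concat_text_py text (concat_text_py text)

-- ===== LEMMAS AND PROOFS =====

-- bracket-counter step
def pvStp (c : Int) (x : Char) : Int := if x = '[' then c + 1 else if x = ']' then c - 1 else c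

-- reference splitter: groups closed where the counter hits zero; a pending group is dropped
def pvSplitZ (c : Int) (strg : List Char) : List Char → List (List Char)
  | [] => []
  | x :: xs =>
    if pvStp c x = 0 then (strg ++ [x]) :: pvSplitZ 0 [] xs
    else pvSplitZ (pvStp c x) (strg ++ [x]) xs

-- boundary indices recorded by B's first pass, as Nats
def pvBounds (n : Nat) (c : Int) : List Char → List Nat
  | [] => []
  | x :: xs =>
    if pvStp c x = 0 then (n + 1) :: pvBounds (n + 1) 0 xs
    else pvBounds (n + 1) (pvStp c x) xs

-- second phase of B, structurally: slice between consecutive boundaries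
def pvCut (L : List Char) (m : Nat) : List Nat → List (List Char)
  | [] => []
  | b :: bs => (L.drop m).take (b - m) :: pvCut L b bs

lemma pvA_fold (rest : List Char) (acc : List String) (c : Int) (strg : List Char) :
    (rest.foldl
      (fun (s : List String × Int × List Char) i =>
        let ctr : Int := if i = '[' then s.2.1 + 1 else if i = ']' then s.2.1 - 1 else s.2.1
        let strg := s.2.2 ++ [i]
        if ctr = 0 then (s.1 ++ [String.ofList strg], ctr, []) else (s.1, ctr, strg))
      (acc, c, strg)).1
    = acc ++ (pvSplitZ c strg rest).map String.ofList := by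
  induction rest generalizing acc c strg with
  | nil => simp [pvSplitZ]
  | cons x xs ih =>
    simp only [List.foldl_cons, pvSplitZ, pvStp]
    by_cases h : (if x = '[' then c + 1 else if x = ']' then c - 1 else c) = 0
    · rw [if_pos h]
      simp only [h]
      rw [ih]
      simp [List.append_assoc]
    · rw [if_neg h]
      simp only [if_neg h]
      rw [ih]

lemma pvB_fold (rest : List Char) (s : Nat) (c : Int) (bs : List Int) :
    ((PySem.List.enumerate rest (s : Int)).foldl
      (fun (st : Int × List Int) (p : Int × Char) =>
        let ctr : Int := if p.2 = '[' then st.1 + 1 else if p.2 = ']' then st.1 - 1 else st.1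
        if ctr = 0 then (ctr, st.2 ++ [p.1 + 1]) else (ctr, st.2))
      (c, bs)).2
    = bs ++ (pvBounds s c rest).map (Nat.cast : Nat → Int) := by
  induction rest generalizing s c bs with
  | nil => simp [PySem.List.enumerate_nil, pvBounds]
  | cons x xs ih =>
    rw [PySem.List.enumerate_cons]
    simp only [List.foldl_cons, pvBounds, pvStp]
    have hc : ((s : Int) + 1) = ((s + 1 : Nat) : Int) := by push_cast; ring
    by_cases h : (if x = '[' then c + 1 else if x = ']' then c - 1 else c) = 0
    · rw [if_pos h]
      simp only [h]
      rw [hc, ih]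
      simp [List.append_assoc]
    · rw [if_neg h]
      simp only [if_neg h]
      rw [hc, ih]

lemma pvZip_slice (t : String) (m : Nat) (bs : List Nat) :
    ((((m : Nat) : Int) :: bs.map (Nat.cast : Nat → Int)).zip (bs.map (Nat.cast : Nat → Int))).map
      (fun ab => PySem.Str.slice t (some ab.1) (some ab.2))
    = (pvCut t.toList m bs).map String.ofList := by
  induction bs generalizing m with
  | nil => simp [pvCut]
  | cons b bs ih =>
    rw [List.map_cons, List.zip_cons_cons, List.map_cons]
    show _ :: _ = _
    have hhd : PySem.Str.slice t (some ((m : Nat) : Int)) (some ((b : Nat) : Int))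
        = String.ofList ((t.toList.drop m).take (b - m)) := by
      have h1 : (PySem.Str.slice t (some ((m : Nat) : Int)) (some ((b : Nat) : Int))).toList
          = (t.toList.drop m).take (b - m) := by
        simp [PySem.Str.toList_slice, PySem.Chars.slice_eq_listSlice, PySem.List.slice_natCast]
      rw [← h1, String.ofList_toList]
    rw [hhd, pvCut, List.map_cons, ih b]

lemma pvTake_succ_of_drop {L : List Char} {n : Nat} {x : Char} {xs : List Char}
    (hd : L.drop n = x :: xs) (m : Nat) (hm : m ≤ n) :
    (L.drop m).take (n + 1 - m) = (L.drop m).take (n - m) ++ [x] := by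
  have hx : L[n]? = some x := by
    have h0 : (L.drop n)[0]? = some x := by rw [hd]; rfl
    rw [List.getElem?_drop] at h0
    simpa using h0
  have h1 : (L.drop m)[n - m]? = some x := by
    rw [List.getElem?_drop, Nat.add_sub_cancel' hm]
    exact hx
  have h2 : n + 1 - m = (n - m) + 1 := by omega
  rw [h2, List.take_add_one, h1]
  simp

lemma pvMain (xs : List Char) (L : List Char) (n m : Nat) (c : Int)
    (hm : m ≤ n) (hd : L.drop n = xs) :
    pvCut L m (pvBounds n c xs) = pvSplitZ c ((L.drop m).take (n - m)) xs := by
  induction xs generalizing n m c with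
  | nil => simp [pvBounds, pvSplitZ, pvCut]
  | cons x xs ih =>
    have hd' : L.drop (n + 1) = xs := by
      have h : L.drop (n + 1) = (L.drop n).drop 1 := by rw [List.drop_drop]
      rw [h, hd]
      rfl
    simp only [pvBounds, pvSplitZ]
    by_cases h : pvStp c x = 0
    · rw [if_pos h, if_pos h, pvCut]
      have hhd := pvTake_succ_of_drop hd m hm
      have htl := ih (n + 1) (n + 1) 0 (le_refl _) hd'
      simp only [Nat.sub_self, List.take_zero] at htl
      rw [hhd, htl]
    · rw [if_neg h, if_neg h]
      have := ih (n + 1) m (pvStp c x) (by omega) hd'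
      rw [this, pvTake_succ_of_drop hd m hm]

lemma pvAlt_eq (text : String) :
    concat_text_py_alt text = (pvSplitZ 0 [] text.toList).map String.ofList := by
  unfold concat_text_py_alt
  have hb := pvB_fold text.toList 0 0 []
  simp only [Nat.cast_zero] at hb
  simp only [hb, List.nil_append]
  have hz := pvZip_slice text 0 (pvBounds 0 0 text.toList)
  simp only [Nat.cast_zero] at hz
  rw [hz, pvMain text.toList text.toList 0 0 0 (le_refl _) (by simp)]
  simp

-- ===== VERDICT (by name: the statement is the Claim_ definition above) =====
theorem concat_text_py_spec : Claim_equal_concat_text_py := by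
  intro text _ _
  unfold Spec_concat_text_py
  rw [pvAlt_eq]
  unfold concat_text_py
  rw [pvA_fold]
  simp
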